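-- pv_equiv track=rewrite | github.com/RitaAssaf/Scripts_Thesis | generateur_graphes_pos_saubion.py | extraction_arcs
-- ===== SOURCE A (Python) =====
-- def extraction_arcs(mat:list[list],lab:str):
-- 	# lit une liste de liste pour extraire des arcs sur chaque ligne dont le label est lab
-- 	arc_ext=[]
-- 	for li in mat:
-- 		i = 0
-- 		while i < len(li) - 1:
-- 			if li[i] != 0:
-- 				j = i + 1
-- 				while j < len(li) and li[j] == 0:
-- 					j = j + 1
-- 				if j < len(li):
-- 					arc_ext.append((li[i], li[j], {'label': lab}))
-- 				i = j
-- 			else: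
-- 				i = i + 1
-- 	return arc_ext
-- ===== SOURCE B (Python) =====
-- def extraction_arcs(mat: list[list], lab: str):
--     # filter the nonzeros of each row, then pair consecutive elements with zip
--     arc_ext = []
--     for li in mat:
--         nz = [x for x in li if x != 0]
--         for a, b in zip(nz, nz[1:]):
--             arc_ext.append((a, b, {'label': lab}))
--     return arc_ext
-- ===== Notes on version B (the rewrite author's own statement) =====
-- stated objective: simpler
-- what changed: Replaces the nested index-based zero-skipping while loops with a filter of the nonzero values followed by a zip over adjacent pairs.
import Mathlib
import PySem

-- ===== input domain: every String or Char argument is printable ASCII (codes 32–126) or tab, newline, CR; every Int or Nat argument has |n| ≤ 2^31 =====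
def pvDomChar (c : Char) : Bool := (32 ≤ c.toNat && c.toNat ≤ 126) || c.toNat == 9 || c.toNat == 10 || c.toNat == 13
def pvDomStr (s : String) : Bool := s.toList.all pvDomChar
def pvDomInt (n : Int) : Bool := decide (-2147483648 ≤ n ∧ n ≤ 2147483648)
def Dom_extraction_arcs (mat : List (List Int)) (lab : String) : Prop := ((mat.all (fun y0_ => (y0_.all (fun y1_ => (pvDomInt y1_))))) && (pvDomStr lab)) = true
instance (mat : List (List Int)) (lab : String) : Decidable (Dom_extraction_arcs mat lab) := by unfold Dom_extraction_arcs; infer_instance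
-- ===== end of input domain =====

-- B replaces A's nested zero-skipping index loops with a filter-then-zip pairing pass (simpler decomposition).


-- ===== PORT A =====
-- inner while loop: advance j while j < len li and li[j] == 0 (all accesses are guarded, so getD is exact)
def pvSkipZeros (li : List Int) (j : Nat) : Nat :=
  if j < li.length then
    if li.getD j 0 = 0 then pvSkipZeros li (j + 1) else j
  else j
termination_by li.length - j
decreasing_by omega

theorem pvSkipZeros_ge (li : List Int) (j : Nat) : j ≤ pvSkipZeros li j := by
  fun_induction pvSkipZeros li j <;> omega

-- outer while loop over index i, accumulating arcs
def pvRowLoopA (li : List Int) (lab : String) (i : Nat)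
    (acc : List (Int × Int × (List (String × String)))) : List (Int × Int × (List (String × String))) :=
  if i < li.length - 1 then
    if li.getD i 0 ≠ 0 then
      let j := pvSkipZeros li (i + 1)
      let acc' := if j < li.length then acc ++ [(li.getD i 0, li.getD j 0, [("label", lab)])] else acc
      pvRowLoopA li lab j acc'
    else pvRowLoopA li lab (i + 1) acc
  else acc
termination_by li.length - i
decreasing_by
  · have := pvSkipZeros_ge li (i + 1); omega
  · omega

def extraction_arcs (mat : List (List Int)) (lab : String) : List (Int × Int × (List (String × String))) :=
  mat.foldl (fun acc li => pvRowLoopA li lab 0 acc) []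

-- ===== PORT B =====
def pvPairsB (lab : String) (nz : List Int) : List (Int × Int × (List (String × String))) :=
  (nz.zip nz.tail).map (fun p => (p.1, p.2, [("label", lab)]))

def extraction_arcs_alt (mat : List (List Int)) (lab : String) : List (Int × Int × (List (String × String))) :=
  mat.foldl (fun acc li => acc ++ pvPairsB lab (li.filter (fun x => x ≠ 0))) []

-- ===== PRECONDITION & SPEC =====
def Spec_extraction_arcs (mat : List (List Int)) (lab : String) (out : List (Int × Int × (List (String × String)))) : Prop := out = extraction_arcs_alt mat lab
instance (mat : List (List Int)) (lab : String) (out : List (Int × Int × (List (String × String)))) : Decidable (Spec_extraction_arcs mat lab out) := by unfold Spec_extraction_arcs; infer_instance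

-- ===== CLAIM (what is proved, stated in full; the proofs are below) =====
def Claim_equal_extraction_arcs : Prop := ∀ (mat : List (List Int)) (lab : String), Dom_extraction_arcs mat lab → Spec_extraction_arcs mat lab (extraction_arcs mat lab)

-- ===== LEMMAS AND PROOFS =====

theorem pvSkipZeros_nonzero (li : List Int) (j : Nat) (h : pvSkipZeros li j < li.length) :
    li.getD (pvSkipZeros li j) 0 ≠ 0 := by
  fun_induction pvSkipZeros li j with
  | case1 j hj hz ih => exact ih h
  | case2 j hj hz => exact hz
  | case3 j hj => omega

theorem pvSkipZeros_filter (li : List Int) (j : Nat) :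
    (li.drop j).filter (fun x => x ≠ 0) = (li.drop (pvSkipZeros li j)).filter (fun x => x ≠ 0) := by
  fun_induction pvSkipZeros li j with
  | case1 j hj hz ih =>
    rw [← ih, List.drop_eq_getElem_cons hj, List.filter_cons]
    have hz' : li[j] = 0 := by
      have : li.getD j 0 = li[j] := by
        simp [List.getD_eq_getElem?_getD, List.getElem?_eq_getElem hj]
      rw [← this]; exact hz
    simp [hz']
  | case2 j hj hz => rfl
  | case3 j hj => rfl

theorem pvPairsB_cons2 (lab : String) (a b : Int) (l : List Int) :
    pvPairsB lab (a :: b :: l) = (a, b, [("label", lab)]) :: pvPairsB lab (b :: l) := by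
  simp [pvPairsB]

theorem pvRowLoopA_eq (li : List Int) (lab : String) (i : Nat)
    (acc : List (Int × Int × (List (String × String)))) :
    pvRowLoopA li lab i acc = acc ++ pvPairsB lab ((li.drop i).filter (fun x => x ≠ 0)) := by
  fun_induction pvRowLoopA li lab i acc with
  | case1 i acc hi hnz j acc' ih =>
    rw [ih]
    have hij : i + 1 ≤ j := pvSkipZeros_ge li (i + 1)
    have hiL : i < li.length := by omega
    have hgeti : li.getD i 0 = li[i] := by
      simp [List.getD_eq_getElem?_getD, List.getElem?_eq_getElem hiL]
    rw [hgeti] at hnz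
    have hfilter : (li.drop i).filter (fun x => x ≠ 0)
        = li[i] :: (li.drop j).filter (fun x => x ≠ 0) := by
      have hskip := pvSkipZeros_filter li (i + 1)
      rw [List.drop_eq_getElem_cons hiL, List.filter_cons]
      have : (li.drop j).filter (fun x => x ≠ 0)
          = (li.drop (i + 1)).filter (fun x => x ≠ 0) := by rw [hskip]
      rw [this]
      simp [hnz]
    rw [hfilter]
    by_cases hjL : j < li.length
    · have hgetj : li.getD j 0 = li[j] := by
        simp [List.getD_eq_getElem?_getD, List.getElem?_eq_getElem hjL]
      have hnzj : li[j] ≠ 0 := by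
        have := pvSkipZeros_nonzero li (i + 1) hjL
        rw [← hgetj]; exact this
      have hfilter2 : (li.drop j).filter (fun x => x ≠ 0)
          = li[j] :: (li.drop (j + 1)).filter (fun x => x ≠ 0) := by
        rw [List.drop_eq_getElem_cons hjL, List.filter_cons]
        simp [hnzj]
      rw [hfilter2, pvPairsB_cons2]
      simp [acc', hjL, List.getElem?_eq_getElem hiL]
    · have hdropj : li.drop j = [] := List.drop_eq_nil_of_le (by omega)
      rw [hdropj]
      simp [acc', hjL, pvPairsB]
  | case2 i acc hi hz ih =>
    rw [ih]
    have hiL : i < li.length := by omega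
    have hz' : li[i] = 0 := by
      have hgeti : li.getD i 0 = li[i] := by
        simp [List.getD_eq_getElem?_getD, List.getElem?_eq_getElem hiL]
      rw [← hgeti]; simpa using hz
    rw [List.drop_eq_getElem_cons hiL, List.filter_cons]
    simp [hz']
  | case3 i acc hi =>
    have hlen : (li.drop i).length ≤ 1 := by simp; omega
    have hle : ((li.drop i).filter (fun x => x ≠ 0)).length ≤ 1 :=
      le_trans (List.length_filter_le _ _) hlen
    match hnz : (li.drop i).filter (fun x => x ≠ 0) with
    | [] => rw [hnz]; simp [pvPairsB]
    | [a] => rw [hnz]; simp [pvPairsB]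
    | a :: b :: rest => rw [hnz] at hle; simp at hle

-- ===== VERDICT (by name: the statement is the Claim_ definition above) =====
theorem extraction_arcs_spec : Claim_equal_extraction_arcs := by
  intro mat lab _
  unfold Spec_extraction_arcs extraction_arcs extraction_arcs_alt
  have hstep : (fun (acc : List (Int × Int × (List (String × String)))) (li : List Int) => pvRowLoopA li lab 0 acc)
      = (fun acc li => acc ++ pvPairsB lab (li.filter (fun x => x ≠ 0))) := by
    funext acc li
    simpa using pvRowLoopA_eq li lab 0 acc
  rw [hstep]
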